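-- pv_equiv track=rewrite | github.com/Roocksss/Laboratorio2 | DH.py | generar_primitivo
-- ===== SOURCE A (Python) =====
-- def generar_primitivo(P):
--     for i in range(2, P):
--         resultados = []
--         for j in range(0, P - 2):
--             r = pow(i, j, P)
--             resultados.append(r)
--         if len(resultados) != len(set(resultados)):
--             break
--     return i
-- ===== SOURCE B (Python) =====
-- def generar_primitivo(P):
--     for i in range(2, P):
--         target = pow(i, P - 3, P)
--         r = 1
--         for _ in range(P - 3):
--             if r == target:
--                 return i
--             r = r * i % P
--     return i
-- ===== Notes on version B (the rewrite author's own statement) =====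
-- stated objective: faster
-- what changed: B replaces A's build-all-powers-and-compare-list-vs-set-size test by a closed-form reduction: for an iterated sequence, the first P-2 powers of i contain a duplicate iff the LAST one, pow(i,P-3,P), already occurs among the earlier powers, so B computes that single target with fast modular exponentiation and scans a running product against it (no list, no set, O(1) memory, early exit).
import Mathlib
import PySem

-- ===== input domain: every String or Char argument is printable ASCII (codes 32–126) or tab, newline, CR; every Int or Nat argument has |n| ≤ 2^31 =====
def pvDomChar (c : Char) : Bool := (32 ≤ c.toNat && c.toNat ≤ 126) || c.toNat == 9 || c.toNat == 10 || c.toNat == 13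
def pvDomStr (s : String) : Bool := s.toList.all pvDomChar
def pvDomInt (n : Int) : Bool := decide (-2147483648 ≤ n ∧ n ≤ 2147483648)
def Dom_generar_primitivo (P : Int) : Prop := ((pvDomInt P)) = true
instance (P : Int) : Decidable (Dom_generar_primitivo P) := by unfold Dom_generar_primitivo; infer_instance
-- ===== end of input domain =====

-- B replaces A's test "the list of the first P-2 powers of i has fewer distinct values than
-- elements" by the equivalent "the last power pow(i,P-3,P) already occurs among the earlier
-- powers" (valid because the sequence is an iteration of x ↦ x*i % P), checked by a running
-- product against one precomputed target — no list, no set (objective: faster).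

-- ===== PORT A =====
-- inner loop: resultados = []; for j in range(0, P-2): resultados.append(pow(i, j, P))
def pvAinner (i P : Int) : List Int :=
  (PySem.List.pyRange 0 (P - 2) 1).foldl
    (fun acc j => acc ++ [PySem.Int.powMod i j.toNat P]) []

-- outer loop with break: returns i on break, else the last iterated i
def pvALoop (P : Int) : List Int → Int → Int
  | [], last => last
  | i :: rest, _ =>
      let resultados := pvAinner i P
      if resultados.length ≠ (PySem.Set.ofList resultados).length then i
      else pvALoop P rest i

-- for P ≤ 2 the Python raises UnboundLocalError (i never bound); those inputs are outside Pre_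
def generar_primitivo (P : Int) : Int := pvALoop P (PySem.List.pyRange 2 P 1) 0

-- ===== PORT B =====
-- inner loop: r = 1; for _ in range(P-3): if r == target: return i; r = r*i % P
def pvBScan (i P target : Int) : Nat → Int → Bool
  | 0, _ => false
  | n + 1, r =>
      if r == target then true
      else pvBScan i P target n (PySem.Int.mod (r * i) P)

def pvBLoop (P : Int) : List Int → Int → Int
  | [], last => last
  | i :: rest, _ =>
      let target := PySem.Int.powMod i (P - 3).toNat P
      if pvBScan i P target (P - 3).toNat 1 then i
      else pvBLoop P rest i

def generar_primitivo_alt (P : Int) : Int := pvBLoop P (PySem.List.pyRange 2 P 1) 0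

-- ===== PRECONDITION & SPEC =====
-- Pre_ excludes exactly P ≤ 2, where the Python A raises UnboundLocalError (the loop variable i is never bound).
def Pre_generar_primitivo (P : Int) : Prop := 3 ≤ P
instance (P : Int) : Decidable (Pre_generar_primitivo P) := by unfold Pre_generar_primitivo; infer_instance
def pvWitness_generar_primitivo : Int := (7)

def Spec_generar_primitivo (P : Int) (out : Int) : Prop := out = generar_primitivo_alt P
instance (P : Int) (out : Int) : Decidable (Spec_generar_primitivo P out) := by unfold Spec_generar_primitivo; infer_instance

-- ===== CLAIM (what is proved, stated in full; the proofs are below) =====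
def Claim_equal_generar_primitivo : Prop := ∀ (P : Int), Dom_generar_primitivo P → Pre_generar_primitivo P → Spec_generar_primitivo P (generar_primitivo P)

-- ===== LEMMAS AND PROOFS =====

-- the power sequence pw j = pow(i, j, P)
def pvPw (i P : Int) (j : Nat) : Int := PySem.Int.powMod i j P

theorem pvStep (i P : Int) (hP : 0 < P) (k : Nat) :
    PySem.Int.mod (pvPw i P k * i) P = pvPw i P (k + 1) := by
  unfold pvPw
  rw [PySem.Int.powMod_eq_emod i k hP, PySem.Int.powMod_eq_emod i (k + 1) hP,
      PySem.Int.mod_eq_emod_of_pos hP, pow_succ, Int.mul_emod,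
      Int.emod_emod_of_dvd _ dvd_rfl, ← Int.mul_emod]

-- determinism: a repeat shifts forward
theorem pvShift (i P : Int) (hP : 0 < P) (j k : Nat) (h : pvPw i P j = pvPw i P k) :
    ∀ t, pvPw i P (j + t) = pvPw i P (k + t) := by
  intro t
  induction t with
  | zero => simpa using h
  | succ t ih =>
      rw [← Nat.add_assoc, ← Nat.add_assoc, ← pvStep i P hP, ← pvStep i P hP, ih]

-- A's inner list is the map of pw over range (P-2)
theorem pvAinner_eq_map (i P : Int) :
    pvAinner i P = (List.range (P - 2).toNat).map (pvPw i P) := by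
  rw [pvAinner, PySem.List.foldl_append_singleton_eq_map, List.nil_append,
      PySem.List.pyRange_one, List.map_map]
  simp only [Int.sub_zero]
  apply List.map_congr_left
  intro t _
  simp [Function.comp, pvPw]

-- A's break test len(L) != len(set(L)) says exactly "L has a duplicate"
theorem pvLen_ne_iff (L : List Int) :
    (L.length ≠ (PySem.Set.ofList L).length) ↔ ¬ L.Nodup := by
  have hperm : (PySem.Set.ofList L).Perm L.dedup :=
    (List.perm_ext_iff_of_nodup (PySem.Set.nodup_ofList L) L.nodup_dedup).mpr
      (fun a => by simp [PySem.Set.mem_ofList])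
  rw [hperm.length_eq]
  constructor
  · intro h hnd
    exact h (by rw [List.dedup_eq_self.mpr hnd])
  · intro h hlen
    exact h (by
      have := (List.dedup_sublist L).eq_of_length hlen.symm
      rw [← this]; exact L.nodup_dedup)

-- duplicate among pw 0 .. pw (m-1)  ↔  ∃ j k, j < k < m with pw j = pw k
theorem pvNodup_map_range_iff (f : Nat → Int) (m : Nat) :
    ¬ ((List.range m).map f).Nodup ↔ ∃ j k, j < k ∧ k < m ∧ f j = f k := by
  rw [List.Nodup, List.pairwise_map, List.pairwise_iff_getElem]
  simp only [List.getElem_range, List.length_range, not_forall]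
  constructor
  · rintro ⟨j, k, hj, hk, hjk, h⟩
    exact ⟨j, k, hjk, hk, not_not.mp h⟩
  · rintro ⟨j, k, hjk, hk, h⟩
    exact ⟨j, k, lt_trans hjk hk, hk, hjk, not_not.mpr h⟩

-- the key reduction: for an iterated sequence, a duplicate among the first m terms
-- is equivalent to the LAST term occurring earlier
theorem pvLast_iff (i P : Int) (hP : 0 < P) (m : Nat) (hm : 1 ≤ m) :
    (∃ j k, j < k ∧ k < m ∧ pvPw i P j = pvPw i P k) ↔
      (∃ j, j < m - 1 ∧ pvPw i P j = pvPw i P (m - 1)) := by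
  constructor
  · rintro ⟨j, k, hjk, hk, h⟩
    refine ⟨m - 1 - (k - j), by omega, ?_⟩
    have := pvShift i P hP j k h (m - 1 - k)
    have h1 : j + (m - 1 - k) = m - 1 - (k - j) := by omega
    have h2 : k + (m - 1 - k) = m - 1 := by omega
    rwa [h1, h2] at this
  · rintro ⟨j, hj, h⟩
    exact ⟨j, m - 1, by omega, by omega, h⟩

-- B's scan returns true iff the target occurs among pw 0 .. pw (n-1)
theorem pvBScan_iff (i P target : Int) (hP : 0 < P) (n : Nat) :
    ∀ k, (pvBScan i P target n (pvPw i P k) = true ↔ ∃ t, t < n ∧ pvPw i P (k + t) = target) := by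
  induction n with
  | zero => intro k; simp [pvBScan]
  | succ n ih =>
      intro k
      rw [pvBScan, pvStep i P hP k]
      by_cases h : pvPw i P k = target
      · simp only [h, beq_self_eq_true, if_true, true_iff]
        exact ⟨0, Nat.succ_pos n, by simpa using h⟩
      · rw [if_neg (by simpa using h), ih (k + 1)]
        constructor
        · rintro ⟨t, ht, hpt⟩
          exact ⟨t + 1, by omega, by rw [← hpt]; ring_nf⟩
        · rintro ⟨t, ht, hpt⟩
          match t with
          | 0 => exact absurd (by simpa using hpt) h
          | t + 1 => exact ⟨t, by omega, by rw [← hpt]; ring_nf⟩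

-- per-candidate: B's test equals A's test
theorem pvCond_iff (i P : Int) (hP : 3 ≤ P) :
    pvBScan i P (PySem.Int.powMod i (P - 3).toNat P) (P - 3).toNat 1 = true ↔
      (pvAinner i P).length ≠ (PySem.Set.ofList (pvAinner i P)).length := by
  have hP0 : 0 < P := by omega
  have h1 : (1 : Int) = pvPw i P 0 := by
    unfold pvPw
    rw [PySem.Int.powMod_eq_emod i 0 hP0, pow_zero]
    exact (Int.emod_eq_of_lt (by norm_num) (by omega)).symm
  have hm : (P - 3).toNat = (P - 2).toNat - 1 := by omega
  have hm1 : 1 ≤ (P - 2).toNat := by omega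
  rw [pvLen_ne_iff, pvAinner_eq_map, pvNodup_map_range_iff,
      pvLast_iff i P hP0 _ hm1, h1]
  show pvBScan i P (PySem.Int.powMod i (P - 3).toNat P) (P - 3).toNat (pvPw i P 0) = true ↔ _
  rw [pvBScan_iff i P _ hP0 _ 0]
  simp only [Nat.zero_add, hm]
  exact exists_congr fun j => and_congr_right fun _ => Iff.rfl

theorem pvLoop_eq (P : Int) (hP : 3 ≤ P) :
    ∀ (l : List Int) (last : Int), pvALoop P l last = pvBLoop P l last := by
  intro l
  induction l with
  | nil => intro last; rfl
  | cons i rest ih =>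
      intro last
      simp only [pvALoop, pvBLoop]
      by_cases h : (pvAinner i P).length ≠ (PySem.Set.ofList (pvAinner i P)).length
      · rw [if_pos h, if_pos ((pvCond_iff i P hP).mpr h)]
      · rw [if_neg h, if_neg (fun hb => h ((pvCond_iff i P hP).mp hb)), ih]

-- ===== VERDICT (by name: the statement is the Claim_ definition above) =====
theorem generar_primitivo_spec : Claim_equal_generar_primitivo := by
  intro P _ hPre
  unfold Spec_generar_primitivo generar_primitivo generar_primitivo_alt
  exact pvLoop_eq P hPre _ _
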